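-- pv_equiv track=rewrite | github.com/m0ntydad0n/agentcoord | agentcoord/planner.py | _score_risk
-- ===== SOURCE A (Python) =====
-- from typing import List, Dict, Optional, Tuple
--
-- def _score_risk(title: str, description: str, tags: List[str]) -> int:
--     """Score risk level (0-10)."""
--     text = f"{title} {description}".lower()
--
--     high_risk = ['database', 'migration', 'security', 'auth', 'payment', 'production']
--     medium_risk = ['api', 'integration', 'deployment']
--
--     if any(kw in text for kw in high_risk):
--         return 8
--     elif any(kw in text for kw in medium_risk):
--         return 5
--     return 2
-- ===== SOURCE B (Python) =====
-- def _score_risk(title, description, tags):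
--     """Score risk level (0-10)."""
--     text = f"{title} {description}".lower()
--     table = {
--         'database': 8, 'migration': 8, 'security': 8, 'auth': 8,
--         'payment': 8, 'production': 8,
--         'api': 5, 'integration': 5, 'deployment': 5,
--     }
--     return max((score for kw, score in table.items() if kw in text), default=2)
-- ===== Notes on version B (the rewrite author's own statement) =====
-- stated objective: simpler
-- what changed: Replaces the ordered if/elif priority branching over two keyword lists by a single keyword-to-score table and one max-reduction over the matching keywords with default 2 (correct because 8 > 5 > 2).
import Mathlib
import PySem

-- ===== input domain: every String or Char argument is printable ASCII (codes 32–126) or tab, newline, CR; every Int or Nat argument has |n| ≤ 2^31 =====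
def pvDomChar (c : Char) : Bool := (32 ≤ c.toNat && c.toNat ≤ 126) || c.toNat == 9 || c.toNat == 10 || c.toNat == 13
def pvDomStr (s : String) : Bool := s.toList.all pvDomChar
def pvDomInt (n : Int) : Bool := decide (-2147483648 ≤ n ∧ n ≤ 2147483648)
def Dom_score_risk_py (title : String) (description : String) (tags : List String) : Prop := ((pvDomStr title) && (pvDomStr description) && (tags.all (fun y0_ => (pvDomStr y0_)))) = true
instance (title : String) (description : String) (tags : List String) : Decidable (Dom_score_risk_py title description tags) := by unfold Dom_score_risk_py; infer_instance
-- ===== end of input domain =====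

-- B replaces A's ordered if/elif over two keyword lists by one keyword→score table and a max-reduction with default 2 (simpler decomposition; 8 > 5 > 2 makes the max reproduce the priority).


-- ===== PORT A =====
def score_risk_py (title : String) (description : String) (tags : List String) : Int :=
  let text := PySem.Str.lower (title ++ " " ++ description)
  let high_risk := ["database", "migration", "security", "auth", "payment", "production"]
  let medium_risk := ["api", "integration", "deployment"]
  if high_risk.any (fun kw => PySem.Str.isIn kw text) then 8
  else if medium_risk.any (fun kw => PySem.Str.isIn kw text) then 5
  else 2

-- ===== PORT B =====
def score_risk_py_alt (title : String) (description : String) (tags : List String) : Int :=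
  let text := PySem.Str.lower (title ++ " " ++ description)
  let table : List (String × Int) :=
    [("database", 8), ("migration", 8), ("security", 8), ("auth", 8),
     ("payment", 8), ("production", 8),
     ("api", 5), ("integration", 5), ("deployment", 5)]
  match PySem.List.max? ((table.filter (fun p => PySem.Str.isIn p.1 text)).map Prod.snd) (fun x => x) with
  | some v => v
  | none => 2

-- ===== PRECONDITION & SPEC =====
def Spec_score_risk_py (title : String) (description : String) (tags : List String) (out : Int) : Prop := out = score_risk_py_alt title description tags
instance (title : String) (description : String) (tags : List String) (out : Int) : Decidable (Spec_score_risk_py title description tags out) := by unfold Spec_score_risk_py; infer_instance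

-- ===== CLAIM (what is proved, stated in full; the proofs are below) =====
def Claim_equal_score_risk_py : Prop := ∀ (title : String) (description : String) (tags : List String), Dom_score_risk_py title description tags → Spec_score_risk_py title description tags (score_risk_py title description tags)

-- ===== LEMMAS AND PROOFS =====

-- Both ports are the same function of the nine membership booleans of the lowered text:
-- expose the booleans, fix each by cases, and evaluate both closed sides.
set_option maxHeartbeats 4000000 in
theorem score_core (t : String) :
    (if (["database", "migration", "security", "auth", "payment", "production"].any
          (fun kw => PySem.Str.isIn kw t)) then (8 : Int)
     else if (["api", "integration", "deployment"].any (fun kw => PySem.Str.isIn kw t)) then 5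
     else 2)
    = (match PySem.List.max?
          (([("database", (8:Int)), ("migration", 8), ("security", 8), ("auth", 8),
             ("payment", 8), ("production", 8),
             ("api", 5), ("integration", 5), ("deployment", 5)].filter
              (fun p => PySem.Str.isIn p.1 t)).map Prod.snd) (fun x => x) with
       | some v => v
       | none => 2) := by
  by_cases h1 : PySem.Str.isIn "database" t = true <;>
  by_cases h2 : PySem.Str.isIn "migration" t = true <;>
  by_cases h3 : PySem.Str.isIn "security" t = true <;>
  by_cases h4 : PySem.Str.isIn "auth" t = true <;>
  by_cases h5 : PySem.Str.isIn "payment" t = true <;>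
  by_cases h6 : PySem.Str.isIn "production" t = true <;>
  by_cases h7 : PySem.Str.isIn "api" t = true <;>
  by_cases h8 : PySem.Str.isIn "integration" t = true <;>
  by_cases h9 : PySem.Str.isIn "deployment" t = true <;>
  simp_all [PySem.List.max?]

theorem score_risk_eq_alt (title description : String) (tags : List String) :
    score_risk_py title description tags = score_risk_py_alt title description tags :=
  score_core (PySem.Str.lower (title ++ " " ++ description))

-- ===== VERDICT (by name: the statement is the Claim_ definition above) =====
theorem score_risk_py_spec : Claim_equal_score_risk_py := by
  intro title description tags _
  exact score_risk_eq_alt title description tags
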